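-- pv_equiv track=rewrite | github.com/IamArmanNikkhah/co_scientist_langgraph | tools.py | _extract_first_balanced_json
-- ===== SOURCE A (Python) =====
-- from typing import Dict, Optional
--
-- def _extract_first_balanced_json(text: str) -> Optional[str]:
--     """Extract the first balanced JSON object from text.
--     - Skips content before the first '{'
--     - Tracks nested braces
--     - Ignores braces inside quoted strings (handles escapes)
--     - Works even if surrounded by code fences or extra prose
--     """
--     i = 0
--     n = len(text)
--     in_string = False
--     escape = False
--     depth = 0
--     start = -1
--
--     while i < n:
--         ch = text[i]
--         if depth == 0:
--             if ch == '{':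
--                 depth = 1
--                 start = i
--                 i += 1
--                 continue
--             i += 1
--             continue
--
--         # depth > 0: inside JSON
--         if in_string:
--             if escape:
--                 escape = False
--             elif ch == '\\':
--                 escape = True
--             elif ch == '"':
--                 in_string = False
--         else:
--             if ch == '"':
--                 in_string = True
--             elif ch == '{':
--                 depth += 1
--             elif ch == '}':
--                 depth -= 1
--                 if depth == 0 and start != -1:
--                     return text[start : i + 1]
--         i += 1
--     return None
-- ===== SOURCE B (Python) =====
-- from typing import Optional
--
-- def _extract_first_balanced_json(text: str) -> Optional[str]:
--     """Extract the first balanced JSON object from text (find-then-scan)."""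
--     start = text.find('{')
--     if start == -1:
--         return None
--     n = len(text)
--     i = start + 1
--     depth = 1
--     while i < n:
--         ch = text[i]
--         if ch == '"':
--             i += 1
--             while i < n:
--                 if text[i] == '\\':
--                     i += 2
--                 elif text[i] == '"':
--                     break
--                 else:
--                     i += 1
--         elif ch == '{':
--             depth += 1
--         elif ch == '}':
--             depth -= 1
--             if depth == 0:
--                 return text[start : i + 1]
--         i += 1
--     return None
-- ===== Notes on version B (the rewrite author's own statement) =====
-- stated objective: simpler
-- what changed: Replaces A's five-variable character-by-character state machine (i, in_string, escape, depth, start threaded through every iteration) with str.find to locate the first opening brace, then a scan that keeps only a depth counter and skips each quoted string in a dedicated inner loop (escapes handled by jumping two positions).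
import Mathlib
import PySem

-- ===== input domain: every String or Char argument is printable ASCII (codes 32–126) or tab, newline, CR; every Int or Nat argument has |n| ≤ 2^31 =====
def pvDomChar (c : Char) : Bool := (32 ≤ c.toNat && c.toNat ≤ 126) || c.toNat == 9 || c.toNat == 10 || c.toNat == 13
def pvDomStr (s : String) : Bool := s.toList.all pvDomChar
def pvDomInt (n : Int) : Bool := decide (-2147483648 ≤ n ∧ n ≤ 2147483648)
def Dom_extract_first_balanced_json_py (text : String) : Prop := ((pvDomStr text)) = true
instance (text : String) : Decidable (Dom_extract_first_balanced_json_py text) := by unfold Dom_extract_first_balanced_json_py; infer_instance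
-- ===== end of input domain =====

-- B replaces A's five-variable single state machine (depth/in_string/escape/start flags) by
-- find-then-scan: locate the first opening brace with str.find, then one outer loop over a single
-- depth counter with a dedicated inner loop that skips each quoted string.  Objective: simpler
-- (and a timing run measured B faster by a constant factor).

-- termination helpers for the loop ports (cited by name in decreasing_by)
theorem pv_dec1 (n i : Nat) (h : i < n) : n - (i+1) < n - i := by omega
theorem pv_dec2 (n i : Nat) (h : i < n) : n - (i+2) < n - i := by omega

-- ===== PORT A =====
-- the while-loop of A, state (i, in_string, escape, depth, start), transliterated
def pvALoop (cs : List Char) (i : Nat) (in_string escape : Bool) (depth : Int) (start : Int) : Option String :=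
  if h : i < cs.length then
    let ch := cs[i]
    if depth == 0 then
      if ch == '{' then pvALoop cs (i+1) in_string escape 1 (Int.ofNat i)
      else pvALoop cs (i+1) in_string escape depth start
    else if in_string then
      if escape then pvALoop cs (i+1) in_string false depth start
      else if ch == '\\' then pvALoop cs (i+1) in_string true depth start
      else if ch == '"' then pvALoop cs (i+1) false escape depth start
      else pvALoop cs (i+1) in_string escape depth start
    else
      if ch == '"' then pvALoop cs (i+1) true escape depth start
      else if ch == '{' then pvALoop cs (i+1) in_string escape (depth+1) start
      else if ch == '}' then
        if depth - 1 == 0 && start != -1 then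
          some (String.ofList (PySem.List.slice cs (some start) (some (Int.ofNat (i+1)))))
        else pvALoop cs (i+1) in_string escape (depth-1) start
      else pvALoop cs (i+1) in_string escape depth start
  else none
termination_by cs.length - i
decreasing_by all_goals exact pv_dec1 cs.length i h

def extract_first_balanced_json_py (text : String) : Option String :=
  pvALoop text.toList 0 false false 0 (-1)

-- ===== PORT B =====
-- B's inner while-loop: advance through a quoted string, return the final value of i
def pvBStr (cs : List Char) (i : Nat) : Nat :=
  if h : i < cs.length then
    if cs[i] == '\\' then pvBStr cs (i+2)
    else if cs[i] == '"' then i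
    else pvBStr cs (i+1)
  else i
termination_by cs.length - i
decreasing_by
  · exact pv_dec2 cs.length i h
  · exact pv_dec1 cs.length i h

-- needed by pvBLoop's termination proof
theorem pvBStr_ge (cs : List Char) (i : Nat) : i ≤ pvBStr cs i := by
  fun_induction pvBStr cs i with
  | case1 _ _ _ ih => omega
  | case2 => omega
  | case3 _ _ _ _ ih => omega
  | case4 => omega

theorem pv_dec3 (cs : List Char) (i : Nat) (h : i < cs.length) :
    cs.length - (pvBStr cs (i+1) + 1) < cs.length - i := by
  have := pvBStr_ge cs (i+1); omega

-- B's outer while-loop, state (i, depth); start is fixed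
def pvBLoop (cs : List Char) (i : Nat) (depth : Int) (start : Nat) : Option String :=
  if h : i < cs.length then
    let ch := cs[i]
    if ch == '"' then pvBLoop cs (pvBStr cs (i+1) + 1) depth start
    else if ch == '{' then pvBLoop cs (i+1) (depth+1) start
    else if ch == '}' then
      if depth - 1 == 0 then
        some (String.ofList (PySem.List.slice cs (some (start : Int)) (some ((i+1 : Nat) : Int))))
      else pvBLoop cs (i+1) (depth-1) start
    else pvBLoop cs (i+1) depth start
  else none
termination_by cs.length - i
decreasing_by
  · exact pv_dec3 cs i h
  · exact pv_dec1 cs.length i h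
  · exact pv_dec1 cs.length i h
  · exact pv_dec1 cs.length i h

def extract_first_balanced_json_py_alt (text : String) : Option String :=
  let start := PySem.Str.find text "{"
  if start == -1 then none
  else pvBLoop text.toList (start.toNat + 1) 1 start.toNat

-- ===== PRECONDITION & SPEC =====
def Spec_extract_first_balanced_json_py (text : String) (out : Option String) : Prop := out = extract_first_balanced_json_py_alt text
instance (text : String) (out : Option String) : Decidable (Spec_extract_first_balanced_json_py text out) := by unfold Spec_extract_first_balanced_json_py; infer_instance

-- ===== CLAIM (what is proved, stated in full; the proofs are below) =====
def Claim_equal_extract_first_balanced_json_py : Prop := ∀ (text : String), Dom_extract_first_balanced_json_py text → Spec_extract_first_balanced_json_py text (extract_first_balanced_json_py text)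

-- ===== LEMMAS AND PROOFS =====

theorem pvBLoop_none (cs : List Char) (i : Nat) (depth : Int) (start : Nat)
    (h : ¬ i < cs.length) : pvBLoop cs i depth start = none := by
  rw [pvBLoop, dif_neg h]


theorem pv_single_prefix (a : Char) (l : List Char) : [a] <+: l ↔ l.head? = some a := by
  cases l with
  | nil => simp
  | cons b t => simp [List.cons_prefix_cons, eq_comm]

theorem pv_main (cs : List Char) (k : Nat) : ∀ (i : Nat) (depth : Int) (start : Nat),
    cs.length - i < k → 1 ≤ depth →
    (pvALoop cs i false false depth (Int.ofNat start) = pvBLoop cs i depth start ∧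
     pvALoop cs i true false depth (Int.ofNat start) = pvBLoop cs (pvBStr cs i + 1) depth start) := by
  induction k with
  | zero => intro i depth start hk; omega
  | succ k ih =>
    intro i depth start hk hd
    have hd0 : (depth == 0) = false := by simp; omega
    have hs0 : ((Int.ofNat start) != -1) = true := by simp [bne]
    by_cases h : i < cs.length
    · constructor
      · rw [pvALoop, pvBLoop]
        simp only [dif_pos h, hd0, Bool.false_eq_true, if_false]
        by_cases hq : cs[i] = '"'
        · simp only [hq, show ('"' == '{') = false from rfl,
            show ('"' == '}') = false from rfl, Bool.false_eq_true, if_false,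
            show ('"' == '"') = true from rfl, if_pos]
          exact (ih (i+1) depth start (by omega) hd).2
        · by_cases ho : cs[i] = '{'
          · simp only [ho, show ('{' == '"') = false from rfl, Bool.false_eq_true, if_false,
              show ('{' == '{') = true from rfl, if_pos]
            exact (ih (i+1) (depth+1) start (by omega) (by omega)).1
          · by_cases hcl : cs[i] = '}'
            · simp only [hcl, show ('}' == '"') = false from rfl, Bool.false_eq_true, if_false,
                show ('}' == '{') = false from rfl, show ('}' == '}') = true from rfl, if_pos, hs0,
                Bool.and_true]
              by_cases hz : depth - 1 = 0
              · simp [hz]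
              · have hz' : (depth - 1 == 0) = false := by simp; omega
                simp only [hz', Bool.false_eq_true, if_false]
                exact (ih (i+1) (depth-1) start (by omega) (by omega)).1
            · have e1 : (cs[i] == '"') = false := by simp [hq]
              have e2 : (cs[i] == '{') = false := by simp [ho]
              have e3 : (cs[i] == '}') = false := by simp [hcl]
              simp only [e1, e2, e3, Bool.false_eq_true, if_false]
              exact (ih (i+1) depth start (by omega) hd).1
      · rw [pvALoop, pvBStr]
        simp only [dif_pos h]
        by_cases hb : cs[i] = '\\'
        · simp [hd0, hb]
          by_cases h2 : i+1 < cs.length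
          · rw [pvALoop, dif_pos h2]
            simp [hd0]
            exact (ih (i+2) depth start (by omega) hd).2
          · rw [pvALoop, dif_neg h2, pvBStr, dif_neg (show ¬ i+2 < cs.length by omega)]
            exact (pvBLoop_none cs (i+2+1) depth start (by omega)).symm
        · by_cases hq : cs[i] = '"'
          · simp [hd0, hq]
            exact (ih (i+1) depth start (by omega) hd).1
          · simp [hd0, hb, hq]
            exact (ih (i+1) depth start (by omega) hd).2
    · have hA1 : pvALoop cs i false false depth (Int.ofNat start) = none := by
        rw [pvALoop, dif_neg h]
      have hA2 : pvALoop cs i true false depth (Int.ofNat start) = none := by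
        rw [pvALoop, dif_neg h]
      have hS : pvBStr cs i = i := by rw [pvBStr, dif_neg h]
      refine ⟨?_, ?_⟩
      · rw [hA1, pvBLoop_none cs i depth start h]
      · rw [hA2, hS, pvBLoop_none cs (i+1) depth start (by omega)]

theorem pv_zero_none (cs : List Char) (k : Nat) : ∀ (i : Nat), cs.length - i < k →
    (∀ j, i ≤ j → j < cs.length → cs[j]? ≠ some '{') →
    pvALoop cs i false false 0 (-1) = none := by
  induction k with
  | zero => intro i hk; omega
  | succ k ih =>
    intro i hk hno
    by_cases h : i < cs.length
    · have hne : cs[i] ≠ '{' := by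
        have := hno i (le_refl i) h
        simpa [List.getElem?_eq_getElem h] using this
      rw [pvALoop]
      simp only [dif_pos h, show ((0:Int) == 0) = true from rfl, if_pos,
        show (cs[i] == '{') = false from by simp [hne], Bool.false_eq_true, if_false]
      exact ih (i+1) (by omega) (fun j hj hjl => hno j (by omega) hjl)
    · rw [pvALoop, dif_neg h]

theorem pv_zero_find (cs : List Char) (k : Nat) : ∀ (i j : Nat), cs.length - i < k →
    i ≤ j → j < cs.length → cs[j]? = some '{' →
    (∀ m, i ≤ m → m < j → cs[m]? ≠ some '{') →
    pvALoop cs i false false 0 (-1) = pvBLoop cs (j+1) 1 j := by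
  induction k with
  | zero => intro i j hk; omega
  | succ k ih =>
    intro i j hk hij hj hc hno
    have h : i < cs.length := by omega
    by_cases hi : i = j
    · subst hi
      have hcc : cs[i] = '{' := by simpa [List.getElem?_eq_getElem h] using hc
      rw [pvALoop]
      simp only [dif_pos h, show ((0:Int) == 0) = true from rfl, if_pos,
        show (cs[i] == '{') = true from by simp [hcc], if_pos]
      exact (pv_main cs (cs.length + 1) (i+1) 1 i (by omega) (by omega)).1
    · have hne : cs[i] ≠ '{' := by
        have := hno i (le_refl i) (by omega)
        simpa [List.getElem?_eq_getElem h] using this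
      rw [pvALoop]
      simp only [dif_pos h, show ((0:Int) == 0) = true from rfl, if_pos,
        show (cs[i] == '{') = false from by simp [hne], Bool.false_eq_true, if_false]
      exact ih (i+1) j (by omega) (by omega) hj hc (fun m hm hml => hno m (by omega) hml)


-- ===== VERDICT (by name: the statement is the Claim_ definition above) =====
theorem extract_first_balanced_json_py_spec : Claim_equal_extract_first_balanced_json_py := by
  intro text _
  unfold Spec_extract_first_balanced_json_py extract_first_balanced_json_py
    extract_first_balanced_json_py_alt
  have hfe : PySem.Str.find text "{" = PySem.Chars.find text.toList ['{'] := by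
    rw [PySem.Str.find_eq]; rfl
  by_cases hf : PySem.Str.find text "{" = -1
  · have hni : ¬ ['{'] <:+: text.toList := by
      rw [← PySem.Chars.find_eq_neg_one_iff, ← hfe]; exact hf
    simp only [hf, show ((-1 : Int) == -1) = true from rfl, if_pos]
    refine pv_zero_none text.toList (text.toList.length + 1) 0 (by omega) ?_
    intro j _ _ hj
    rcases List.getElem?_eq_some_iff.1 hj with ⟨hlt, hget⟩
    exact hni ((List.singleton_infix_iff '{' text.toList).2 (hget ▸ List.getElem_mem hlt))
  · have h0 : 0 ≤ PySem.Chars.find text.toList ['{'] := by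
      have := PySem.Chars.neg_one_le_find text.toList ['{']
      rw [← hfe] at *; omega
    obtain ⟨hpre, hmin⟩ := PySem.Chars.find_spec h0
    set j := (PySem.Chars.find text.toList ['{']).toNat with hj
    have hjc : text.toList[j]? = some '{' := by
      rw [← List.head?_drop]; exact (pv_single_prefix _ _).1 hpre
    have hjlt : j < text.toList.length := (List.getElem?_eq_some_iff.1 hjc).1
    have hno : ∀ m, 0 ≤ m → m < j → text.toList[m]? ≠ some '{' := by
      intro m _ hm hmc
      exact hmin m hm ((pv_single_prefix _ _).2 (by rw [List.head?_drop]; exact hmc))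
    have hf' : ¬ PySem.Chars.find text.toList ['{'] = -1 := by rw [← hfe]; exact hf
    have hne : (PySem.Chars.find text.toList ['{'] == -1) = false := by simp [hf']
    simp only [hfe, hne, Bool.false_eq_true, if_false]
    exact pv_zero_find text.toList (text.toList.length + 1) 0 j (by omega) (by omega) hjlt hjc hno
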